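-- pv_equiv track=rewrite | github.com/yavuzerbas/Cng-438-Assignment2 | assignment2.py | divedeStringToSubstrings
-- ===== SOURCE A (Python) =====
-- def divedeStringToSubstrings(text, key):
--     subStrings = []
--     for i in range(len(key)):
--         subString = key[i]
--         subStrings.append(subString)
--     for i in range(len(text)):
--         subStrings[i%len(key)] += text[i]
--     return subStrings
-- ===== SOURCE B (Python) =====
-- def divedeStringToSubstrings(text, key):
--     # Gather per bucket: bucket j = key[j] + chars of text at positions j, j+n, j+2n, ...
--     n = len(key)
--     out = []
--     for j in range(n):
--         bucket = key[j]
--         pos = j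
--         while pos < len(text):
--             bucket += text[pos]
--             pos += n
--         out.append(bucket)
--     return out
-- ===== Notes on version B (the rewrite author's own statement) =====
-- stated objective: alternative
-- what changed: B gathers each output bucket in one pass (key[j] followed by the text characters at positions j, j+n, j+2n, ...) instead of A's single scatter loop that routes each character by i % len(key).
import Mathlib
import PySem

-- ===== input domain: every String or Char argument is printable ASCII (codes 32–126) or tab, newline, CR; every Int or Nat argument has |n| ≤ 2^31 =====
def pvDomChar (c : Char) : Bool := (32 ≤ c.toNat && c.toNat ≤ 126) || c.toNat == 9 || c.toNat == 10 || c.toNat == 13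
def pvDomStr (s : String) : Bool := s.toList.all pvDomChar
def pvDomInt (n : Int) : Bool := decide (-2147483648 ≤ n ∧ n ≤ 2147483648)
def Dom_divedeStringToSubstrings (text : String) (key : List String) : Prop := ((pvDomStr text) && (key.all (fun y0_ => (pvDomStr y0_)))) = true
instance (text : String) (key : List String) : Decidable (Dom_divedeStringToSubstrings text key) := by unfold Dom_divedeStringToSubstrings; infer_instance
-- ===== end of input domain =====

-- B gathers each bucket j in one pass (key[j] then text chars j, j+n, j+2n, …) instead of
-- A's single scatter loop with modular indexing; objective: alternative decomposition, same cost.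

-- ===== PORT A =====
-- for i in range(len(key)): subStrings.append(key[i]);  then
-- for i in range(len(text)): subStrings[i%len(key)] += text[i]   (iterated as chars with index)
def divedeStringToSubstrings (text : String) (key : List String) : List String :=
  let subStrings : List String := key.foldl (fun acc s => acc ++ [s]) []
  (text.toList.zipIdx).foldl
    (fun st ci => st.modify (ci.2 % key.length) (fun s => s.push ci.1)) subStrings

-- ===== PORT B =====
-- the inner 'while pos < len(text): bucket += text[pos]; pos += n' loop, on the suffix from pos:
-- take the head char, then skip n-1 chars to reach the next position.
def strideGather (n : Nat) (s : String) : List Char → String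
  | [] => s
  | c :: rest => strideGather n (s.push c) (rest.drop (n - 1))
termination_by l => l.length
decreasing_by simp

def divedeStringToSubstrings_alt (text : String) (key : List String) : List String :=
  let n := key.length
  (List.range n).foldl (fun out j => out ++ [strideGather n key[j]! (text.toList.drop j)]) []

-- ===== PRECONDITION & SPEC =====
-- Pre_ excludes exactly the inputs where A raises ZeroDivisionError: empty key with nonempty text.
def Pre_divedeStringToSubstrings (text : String) (key : List String) : Prop :=
  key ≠ [] ∨ text = ""
instance (text : String) (key : List String) : Decidable (Pre_divedeStringToSubstrings text key) := by unfold Pre_divedeStringToSubstrings; infer_instance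
def pvWitness_divedeStringToSubstrings : String × List String := ("abcde", ["x", "y"])

def Spec_divedeStringToSubstrings (text : String) (key : List String) (out : List String) : Prop := out = divedeStringToSubstrings_alt text key
instance (text : String) (key : List String) (out : List String) : Decidable (Spec_divedeStringToSubstrings text key out) := by unfold Spec_divedeStringToSubstrings; infer_instance

-- ===== CLAIM (what is proved, stated in full; the proofs are below) =====
def Claim_equal_divedeStringToSubstrings : Prop := ∀ (text : String) (key : List String), Dom_divedeStringToSubstrings text key → Pre_divedeStringToSubstrings text key → Spec_divedeStringToSubstrings text key (divedeStringToSubstrings text key)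

-- ===== LEMMAS AND PROOFS =====

-- generic: foldl that appends singletons is acc ++ map
theorem foldl_append_singleton {α β : Type} (g : α → β) :
    ∀ (l : List α) (acc : List β), l.foldl (fun out j => out ++ [g j]) acc = acc ++ l.map g := by
  intro l
  induction l with
  | nil => intro acc; simp
  | cons x xs ih => intro acc; simp [List.foldl, ih]

-- the A-side scatter loop, carried by the residue r = i % n
def scatterRes (n : Nat) : Nat → List String → List Char → List String
  | _, st, [] => st
  | r, st, c :: rest => scatterRes n ((r + 1) % n) (st.modify r (fun s => s.push c)) rest

theorem zipIdx_foldl_eq_scatterRes (n : Nat) :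
    ∀ (cs : List Char) (i0 : Nat) (st : List String),
      (cs.zipIdx i0).foldl (fun st ci => st.modify (ci.2 % n) (fun s => s.push ci.1)) st
        = scatterRes n (i0 % n) st cs := by
  intro cs
  induction cs with
  | nil => intro i0 st; simp [scatterRes]
  | cons c rest ih =>
    intro i0 st
    simp only [List.zipIdx_cons, List.foldl_cons]
    rw [ih (i0 + 1)]
    have h : (i0 + 1) % n = (i0 % n + 1) % n := (Nat.mod_add_mod i0 n 1).symm
    rw [h]
    rfl

-- distance from residue r to bucket j, avoiding Nat subtraction pitfalls
def pvDist (n r j : Nat) : Nat := if r ≤ j then j - r else n + j - r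

theorem length_scatterRes (n : Nat) :
    ∀ (cs : List Char) (r : Nat) (st : List String), (scatterRes n r st cs).length = st.length := by
  intro cs
  induction cs with
  | nil => intro r st; simp [scatterRes]
  | cons c rest ih => intro r st; simp [scatterRes, ih]

theorem scatterRes_getElem (n : Nat) (hn : 0 < n) :
    ∀ (cs : List Char) (r : Nat) (hr : r < n) (st : List String) (hst : st.length = n)
      (j : Nat) (hj : j < n),
      (scatterRes n r st cs)[j]! = strideGather n st[j]! (cs.drop (pvDist n r j)) := by
  intro cs
  induction cs with
  | nil =>
    intro r _hr st _hst j _hj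
    simp only [scatterRes]
    rw [strideGather.eq_def]
    simp
  | cons c rest ih =>
    intro r hr st hst j hj
    have hlen : (st.modify r (fun s => s.push c)).length = n := by simp [hst]
    have hr' : (r + 1) % n < n := Nat.mod_lt _ hn
    rw [show scatterRes n r st (c :: rest)
          = scatterRes n ((r + 1) % n) (st.modify r (fun s => s.push c)) rest from rfl]
    rw [ih ((r + 1) % n) hr' _ hlen j hj]
    by_cases hjr : j = r
    · subst hjr
      have hget : (st.modify j (fun s => s.push c))[j]! = st[j]!.push c := by
        have hjlt : j < st.length := by omega
        rw [getElem!_pos (st.modify j fun s => s.push c) j (by simpa using hjlt),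
            getElem!_pos st j hjlt]
        simp
      rw [hget]
      have hd : pvDist n ((j + 1) % n) j = n - 1 := by
        by_cases h1 : j + 1 = n
        · rw [h1, Nat.mod_self]; simp [pvDist]; omega
        · rw [Nat.mod_eq_of_lt (by omega)]; simp [pvDist]; omega
      have hd0 : pvDist n j j = 0 := by simp [pvDist]
      rw [hd, hd0]
      rw [show (c :: rest).drop 0 = c :: rest from rfl]
      conv_rhs => rw [strideGather.eq_def]
    · have hget : (st.modify r (fun s => s.push c))[j]! = st[j]! := by
        by_cases hjlt : j < st.length
        · rw [getElem!_pos (st.modify r fun s => s.push c) j (by simpa using hjlt),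
              getElem!_pos st j hjlt]
          rw [List.getElem_modify]
          simp [Ne.symm hjr]
        · omega
      rw [hget]
      have hd1 : 1 ≤ pvDist n r j := by unfold pvDist; split <;> omega
      have hd : pvDist n ((r + 1) % n) j = pvDist n r j - 1 := by
        by_cases h1 : r + 1 = n
        · rw [h1, Nat.mod_self]; unfold pvDist; split <;> split <;> omega
        · rw [Nat.mod_eq_of_lt (by omega)]; unfold pvDist; split <;> split <;> omega
      rw [hd]
      have : (c :: rest).drop (pvDist n r j) = rest.drop (pvDist n r j - 1) := by
        rw [show pvDist n r j = (pvDist n r j - 1) + 1 by omega]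
        rfl
      rw [this]

theorem divedeStringToSubstrings_spec : Claim_equal_divedeStringToSubstrings := by
  intro text key _ hpre
  unfold Spec_divedeStringToSubstrings divedeStringToSubstrings divedeStringToSubstrings_alt
  rcases Nat.eq_zero_or_pos key.length with h0 | hn
  · -- key = [], hence text = "" by Pre_
    have hk : key = [] := List.eq_nil_of_length_eq_zero h0
    subst hk
    rcases hpre with h | h
    · exact absurd rfl h
    · subst h; decide
  · -- key nonempty
    simp only []
    rw [foldl_append_singleton (fun j => strideGather key.length key[j]! (text.toList.drop j))
          (List.range key.length) []]
    rw [show (key.foldl (fun acc s => acc ++ [s]) [] : List String) =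
          [] ++ key.map id from foldl_append_singleton id key []]
    simp only [List.nil_append, List.map_id]
    rw [zipIdx_foldl_eq_scatterRes key.length text.toList 0 key]
    rw [Nat.zero_mod]
    apply List.ext_getElem
    · rw [length_scatterRes]; simp
    · intro j hj1 hj2
      have hjn : j < key.length := by simpa using hj2
      have hlhs : (scatterRes key.length 0 key text.toList)[j]'hj1
          = (scatterRes key.length 0 key text.toList)[j]! := by
        rw [getElem!_pos (scatterRes key.length 0 key text.toList) j hj1]
      rw [hlhs, scatterRes_getElem key.length hn text.toList 0 hn key rfl j hjn]
      have hd : pvDist key.length 0 j = j := by simp [pvDist]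
      rw [hd]
      simp [hjn]
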